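-- pv_equiv track=rewrite | github.com/hamzawaheed317/Own-train-backend | controllers/query_preprocessor.py | extract_noun_phrases
-- ===== SOURCE A (Python) =====
-- def extract_noun_phrases(tokens, pos_tags):
--     """Extract noun phrases without requiring special NLTK resources"""
--     noun_phrases = []
--     current_phrase = []
--
--     for word, tag in pos_tags:
--         if tag.startswith('NN') or tag.startswith('JJ'):
--             current_phrase.append(word)
--         else:
--             if current_phrase:
--                 noun_phrases.append(' '.join(current_phrase))
--                 current_phrase = []
--
--     if current_phrase:
--         noun_phrases.append(' '.join(current_phrase))
--
--     return noun_phrases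
-- ===== SOURCE B (Python) =====
-- def extract_noun_phrases(tokens, pos_tags):
--     """Extract noun phrases without requiring special NLTK resources"""
--     def keep(tag):
--         return tag.startswith('NN') or tag.startswith('JJ')
--
--     def go(pairs):
--         if not pairs:
--             return []
--         (word, tag), rest = pairs[0], pairs[1:]
--         if not keep(tag):
--             return go(rest)
--         i = 0
--         while i < len(rest) and keep(rest[i][1]):
--             i += 1
--         phrase = ' '.join([word] + [w for w, _ in rest[:i]])
--         return [phrase] + go(rest[i:])
--
--     return go(list(pos_tags))
-- ===== Notes on version B (the rewrite author's own statement) =====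
-- stated objective: alternative
-- what changed: Replaced A's single fold carrying a current_phrase accumulator with a flush at the end by a run-splitting recursion: skip non-keeper tags, take the maximal run of NN/JJ tags, join it into one phrase, and recurse on the remainder.
import Mathlib
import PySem

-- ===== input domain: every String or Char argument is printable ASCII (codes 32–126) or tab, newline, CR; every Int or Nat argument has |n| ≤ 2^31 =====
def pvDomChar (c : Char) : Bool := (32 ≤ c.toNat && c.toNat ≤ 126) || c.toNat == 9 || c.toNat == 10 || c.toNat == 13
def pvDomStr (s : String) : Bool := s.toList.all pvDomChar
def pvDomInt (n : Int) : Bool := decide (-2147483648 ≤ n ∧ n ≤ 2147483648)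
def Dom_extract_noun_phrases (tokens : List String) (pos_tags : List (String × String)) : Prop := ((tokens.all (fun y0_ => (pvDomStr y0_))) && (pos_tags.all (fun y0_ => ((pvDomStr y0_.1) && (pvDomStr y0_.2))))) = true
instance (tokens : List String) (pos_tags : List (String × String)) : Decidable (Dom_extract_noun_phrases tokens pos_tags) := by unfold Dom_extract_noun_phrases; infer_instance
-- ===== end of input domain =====

-- B replaces A's accumulator-and-flush fold by a run-splitting recursion (same cost; alternative decomposition).


-- ===== PORT A =====
-- for-loop over pos_tags carrying (noun_phrases, current_phrase); flush at the end
def extract_noun_phrases (tokens : List String) (pos_tags : List (String × String)) : List String :=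
  let st := pos_tags.foldl (fun (st : List String × List String) wt =>
    if PySem.Str.startswith wt.2 "NN" || PySem.Str.startswith wt.2 "JJ" then
      (st.1, st.2 ++ [wt.1])
    else
      if st.2 ≠ [] then (st.1 ++ [PySem.Str.join " " st.2], []) else st) ([], [])
  if st.2 ≠ [] then st.1 ++ [PySem.Str.join " " st.2] else st.1

-- ===== PORT B =====
def pvKeepB (tag : String) : Bool :=
  PySem.Str.startswith tag "NN" || PySem.Str.startswith tag "JJ"

-- B's `go`: skip a non-keeper, or take the maximal keeper-run (the while loop) as one phrase
def goB : List (String × String) → List String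
  | [] => []
  | (word, tag) :: rest =>
    if pvKeepB tag then
      PySem.Str.join " " (word :: (rest.takeWhile (fun p => pvKeepB p.2)).map Prod.fst)
        :: goB (rest.dropWhile (fun p => pvKeepB p.2))
    else
      goB rest
  termination_by pairs => pairs.length
  decreasing_by
    · exact Nat.lt_succ_of_le (List.length_dropWhile_le _ _)
    · exact Nat.lt_succ_self _

def extract_noun_phrases_alt (tokens : List String) (pos_tags : List (String × String)) : List String :=
  goB pos_tags

-- ===== PRECONDITION & SPEC =====
def Spec_extract_noun_phrases (tokens : List String) (pos_tags : List (String × String)) (out : List String) : Prop := out = extract_noun_phrases_alt tokens pos_tags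
instance (tokens : List String) (pos_tags : List (String × String)) (out : List String) : Decidable (Spec_extract_noun_phrases tokens pos_tags out) := by unfold Spec_extract_noun_phrases; infer_instance

-- ===== CLAIM (what is proved, stated in full; the proofs are below) =====
def Claim_equal_extract_noun_phrases : Prop := ∀ (tokens : List String) (pos_tags : List (String × String)), Dom_extract_noun_phrases tokens pos_tags → Spec_extract_noun_phrases tokens pos_tags (extract_noun_phrases tokens pos_tags)

-- ===== LEMMAS AND PROOFS =====

-- A's loop body and flush, abstracted for the invariant proof
def stepA (st : List String × List String) (wt : String × String) : List String × List String :=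
  if pvKeepB wt.2 then
    (st.1, st.2 ++ [wt.1])
  else
    if st.2 ≠ [] then (st.1 ++ [PySem.Str.join " " st.2], []) else st

def finishA (st : List String × List String) : List String :=
  if st.2 ≠ [] then st.1 ++ [PySem.Str.join " " st.2] else st.1

-- intermediate form: the loop with an explicit pending phrase
def auxA : List String → List (String × String) → List String
  | cur, [] => if cur = [] then [] else [PySem.Str.join " " cur]
  | cur, (w, t) :: rest =>
    if pvKeepB t then auxA (cur ++ [w]) rest
    else (if cur = [] then [] else [PySem.Str.join " " cur]) ++ auxA [] rest

lemma foldA_eq_auxA (pairs : List (String × String)) :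
    ∀ (nps cur : List String),
      finishA (pairs.foldl stepA (nps, cur)) = nps ++ auxA cur pairs := by
  induction pairs with
  | nil =>
    intro nps cur
    simp only [List.foldl_nil, finishA, auxA]
    by_cases h : cur = [] <;> simp [h]
  | cons wt rest ih =>
    intro nps cur
    obtain ⟨w, t⟩ := wt
    simp only [List.foldl_cons, auxA]
    by_cases hk : pvKeepB t
    · have hst : stepA (nps, cur) (w, t) = (nps, cur ++ [w]) := by
        simp [stepA, hk]
      rw [hst, ih, if_pos hk]
    · have hs : stepA (nps, cur) (w, t) =
          (if cur = [] then (nps, cur) else (nps ++ [PySem.Str.join " " cur], [])) := by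
        simp only [stepA, hk, Bool.false_eq_true, if_false, ne_eq, ite_not]
      rw [hs, if_neg hk]
      by_cases hc : cur = []
      · simp [hc, ih]
      · simp [hc, ih, List.append_assoc]

lemma auxA_eq_goB (pairs : List (String × String)) :
    (∀ cur : List String, cur ≠ [] →
      auxA cur pairs =
        PySem.Str.join " " (cur ++ (pairs.takeWhile (fun p => pvKeepB p.2)).map Prod.fst)
          :: goB (pairs.dropWhile (fun p => pvKeepB p.2)))
    ∧ auxA [] pairs = goB pairs := by
  induction pairs with
  | nil =>
    constructor
    · intro cur hc; simp [auxA, goB, hc]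
    · simp [auxA, goB]
  | cons wt rest ih =>
    obtain ⟨w, t⟩ := wt
    constructor
    · intro cur hc
      by_cases hk : pvKeepB t
      · simp only [auxA, if_pos hk]
        rw [ih.1 (cur ++ [w]) (by simp)]
        simp [hk, List.append_assoc]
      · simp only [auxA, if_neg hk]
        rw [ih.2]
        simp [hk, goB, hc]
    · by_cases hk : pvKeepB t
      · simp only [auxA, if_pos hk]
        simp only [List.nil_append]
        rw [ih.1 [w] (by simp)]
        simp [goB, hk]
      · simp only [auxA, if_neg hk]
        rw [ih.2]
        simp [goB, hk]

-- ===== VERDICT (by name: the statement is the Claim_ definition above) =====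
theorem extract_noun_phrases_spec : Claim_equal_extract_noun_phrases := by
  intro tokens pos_tags _
  show extract_noun_phrases tokens pos_tags = extract_noun_phrases_alt tokens pos_tags
  have h1 : extract_noun_phrases tokens pos_tags =
      finishA (pos_tags.foldl stepA ([], [])) := rfl
  rw [h1, foldA_eq_auxA pos_tags [] [], (auxA_eq_goB pos_tags).2]
  rfl
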